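-- pv_equiv track=rewrite | github.com/saltsalt9999/python_activity_exercises | Solutions/level9.py | find_second_lowest_students
-- ===== SOURCE A (Python) =====
-- def find_second_lowest_students(records):
--     if not records:
--         return []  # Handle empty input gracefully
--
--     # Sorting records by score
--     records.sort(key=lambda x: x[1])
--     # Extract scores
--     scores = [record[1] for record in records]
--     # Unique scores sorted
--     unique_scores = sorted(set(scores))
--
--     if len(unique_scores) < 2:
--         return []  # Return empty list if no second lowest grade
--
--     # Second lowest score
--     second_lowest_score = unique_scores[1]
--     # Find students with the second lowest score
--     second_lowest_students = [record[0] for record in records if record[1] == second_lowest_score]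
--     # Sort names alphabetically
--     second_lowest_students.sort()
--     return second_lowest_students
-- ===== SOURCE B (Python) =====
-- def find_second_lowest_students(records):
--     # Return-value equivalent to A; unlike A it does NOT sort `records` in place.
--     if not records:
--         return []
--     lowest = min(score for _, score in records)
--     higher = [score for _, score in records if score > lowest]
--     if not higher:
--         return []
--     second = min(higher)
--     return sorted(name for name, score in records if score == second)
-- ===== Notes on version B (the rewrite author's own statement) =====
-- stated objective: alternative
-- what changed: B replaces A's sort-the-records / sorted-set-of-scores pipeline by two linear min scans (the lowest score, then the least score strictly above it) and only sorts the small list of matching names; unlike A it does not sort the records argument in place.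
import Mathlib
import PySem

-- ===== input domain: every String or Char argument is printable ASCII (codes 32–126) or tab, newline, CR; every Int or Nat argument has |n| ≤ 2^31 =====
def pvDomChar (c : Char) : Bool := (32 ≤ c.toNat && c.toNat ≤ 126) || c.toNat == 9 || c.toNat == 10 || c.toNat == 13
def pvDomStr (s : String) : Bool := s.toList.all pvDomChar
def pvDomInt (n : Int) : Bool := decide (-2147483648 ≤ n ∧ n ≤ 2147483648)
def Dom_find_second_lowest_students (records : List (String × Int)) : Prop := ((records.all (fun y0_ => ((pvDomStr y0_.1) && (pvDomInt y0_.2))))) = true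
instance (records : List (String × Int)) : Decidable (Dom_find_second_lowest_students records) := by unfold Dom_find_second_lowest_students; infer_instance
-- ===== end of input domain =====

-- B replaces A's sort-records/sorted-set pipeline by two min scans (lowest, then the least
-- score above it); equivalence is about the RETURN value only — A sorts `records` in place, B does not.

-- ===== PORT A =====
def find_second_lowest_students (records : List (String × Int)) : List String :=
  if records = [] then []
  else
    let recs := PySem.List.sorted records (fun x => x.2) false
    let scores := recs.map (fun r => r.2)
    let unique_scores := PySem.List.sorted (PySem.Set.ofList scores) (fun x => x) false
    if unique_scores.length < 2 then []
    else
      -- unique_scores[1]; the guard ensures the index is in range, so the default never fires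
      let second_lowest_score := (PySem.List.pyGet? unique_scores 1).getD 0
      let second_lowest_students :=
        (recs.filter (fun r => r.2 == second_lowest_score)).map (fun r => r.1)
      PySem.List.sorted second_lowest_students (fun x => x) false

-- ===== PORT B =====
def find_second_lowest_students_alt (records : List (String × Int)) : List String :=
  if records = [] then []
  else
    -- records ≠ [], so min? returns some and the default never fires
    let lowest := (PySem.List.min? (records.map (fun r => r.2)) (fun x => x)).getD 0
    let higher := (records.map (fun r => r.2)).filter (fun s => lowest < s)
    if higher = [] then []
    else
      let second := (PySem.List.min? higher (fun x => x)).getD 0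
      PySem.List.sorted ((records.filter (fun r => r.2 == second)).map (fun r => r.1))
        (fun x => x) false

-- ===== PRECONDITION & SPEC =====
def Spec_find_second_lowest_students (records : List (String × Int)) (out : List String) : Prop := out = find_second_lowest_students_alt records
instance (records : List (String × Int)) (out : List String) : Decidable (Spec_find_second_lowest_students records out) := by unfold Spec_find_second_lowest_students; infer_instance

-- ===== CLAIM (what is proved, stated in full; the proofs are below) =====
def Claim_equal_find_second_lowest_students : Prop := ∀ (records : List (String × Int)), Dom_find_second_lowest_students records → Spec_find_second_lowest_students records (find_second_lowest_students records)

-- ===== LEMMAS AND PROOFS =====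

theorem pv_main (records : List (String × Int)) :
    find_second_lowest_students records = find_second_lowest_students_alt records := by
  by_cases hnil : records = []
  · simp [find_second_lowest_students, find_second_lowest_students_alt, hnil]
  · unfold find_second_lowest_students find_second_lowest_students_alt
    simp only [hnil, if_false]
    set recs := PySem.List.sorted records (fun x => x.2) false with hrecs
    have hperm : recs.Perm records := PySem.List.sorted_perm records (fun x => x.2) false
    set scores := recs.map (fun r => r.2) with hscores
    set origScores := records.map (fun r => r.2) with horig
    have hsp : scores.Perm origScores := hperm.map _
    have hmemS : ∀ x : Int, x ∈ scores ↔ x ∈ origScores := fun x => hsp.mem_iff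
    set uniq := PySem.List.sorted (PySem.Set.ofList scores) (fun x => x) false with huniq
    have hU : List.Pairwise (fun a b : Int => a < b) uniq :=
      PySem.List.sorted_ofList_pairwise_lt scores
    have hmemU : ∀ x : Int, x ∈ uniq ↔ x ∈ scores := by
      intro x
      rw [huniq, PySem.List.mem_sorted, PySem.Set.mem_ofList]
    have horig_ne : origScores ≠ [] := by
      simp [horig, hnil]
    -- B's `lowest`
    obtain ⟨lo, hlo⟩ : ∃ lo, PySem.List.min? origScores (fun x => x) = some lo := by
      cases h : PySem.List.min? origScores (fun x => x) with
      | none => exact absurd ((PySem.List.min?_eq_none_iff _ _).mp h) horig_ne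
      | some m => exact ⟨m, rfl⟩
    have hloMem : lo ∈ origScores := PySem.List.min?_mem hlo
    have hloMin : ∀ y ∈ origScores, lo ≤ y := PySem.List.min?_isMin hlo
    have hgd : (PySem.List.min? origScores (fun x => x)).getD 0 = lo := by rw [hlo]; rfl
    rw [hgd]
    match hu : uniq with
    | [] =>
      exact absurd ((hmemU lo).mpr ((hmemS lo).mpr hloMem)) (by simp)
    | [u] =>
      have hall : ∀ s ∈ origScores, s = u := by
        intro s hs
        have : s ∈ [u] := (hmemU s).mpr ((hmemS s).mpr hs)
        simpa using this
      have hfil : origScores.filter (fun s => decide (lo < s)) = [] := by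
        rw [List.filter_eq_nil_iff]
        intro s hs
        have h1 := hall s hs
        have h2 := hall lo hloMem
        simp [h1, h2]
      rw [if_pos (by simp : ([u] : List Int).length < 2), if_pos hfil]
    | u0 :: u1 :: rest =>
      have hlen : ¬ (u0 :: u1 :: rest : List Int).length < 2 := by simp
      have hu0lt : ∀ x ∈ u1 :: rest, u0 < x := (List.pairwise_cons.mp hU).1
      have hu1lt : ∀ x ∈ rest, u1 < x := (List.pairwise_cons.mp (List.pairwise_cons.mp hU).2).1
      -- lowest = u0
      have hu0mem : u0 ∈ origScores := (hmemS u0).mp ((hmemU u0).mp (by simp))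
      have hloU : lo ∈ (u0 :: u1 :: rest : List Int) :=
        (hmemU lo).mpr ((hmemS lo).mpr hloMem)
      have hloEq : lo = u0 := by
        rcases List.mem_cons.mp hloU with h | h
        · exact h
        · exact absurd (hu0lt lo h) (not_lt.mpr (hloMin u0 hu0mem))
      -- `higher` is nonempty
      have hu1mem : u1 ∈ origScores := (hmemS u1).mp ((hmemU u1).mp (by simp))
      have hu1hi : u1 ∈ origScores.filter (fun s => decide (lo < s)) := by
        rw [List.mem_filter]
        exact ⟨hu1mem, by simp [hloEq, hu0lt u1 (by simp)]⟩
      have hhi_ne : origScores.filter (fun s => decide (lo < s)) ≠ [] :=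
        List.ne_nil_of_mem hu1hi
      -- `second` = u1
      obtain ⟨sec, hsec⟩ : ∃ s, PySem.List.min? (origScores.filter (fun s => decide (lo < s))) (fun x => x) = some s := by
        cases h : PySem.List.min? (origScores.filter (fun s => decide (lo < s))) (fun x => x) with
        | none => exact absurd ((PySem.List.min?_eq_none_iff _ _).mp h) hhi_ne
        | some m => exact ⟨m, rfl⟩
      have hsecMem := PySem.List.min?_mem hsec
      have hsecMin := PySem.List.min?_isMin hsec
      have hsecU : sec ∈ (u0 :: u1 :: rest : List Int) :=
        (hmemU sec).mpr ((hmemS sec).mpr (List.mem_filter.mp hsecMem).1)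
      have hsecGt : u0 < sec := by
        have := (List.mem_filter.mp hsecMem).2
        rw [hloEq] at this; exact of_decide_eq_true this
      have hsecEq : sec = u1 := by
        have hle : sec ≤ u1 := hsecMin u1 hu1hi
        rcases List.mem_cons.mp hsecU with h | h
        · exact absurd hsecGt (by rw [h]; exact lt_irrefl _)
        rcases List.mem_cons.mp h with h | h
        · exact h
        · exact le_antisymm hle (le_of_lt (hu1lt sec h))
      -- A's index: uniq[1] = u1
      have hidx : (PySem.List.pyGet? (u0 :: u1 :: rest : List Int) 1).getD 0 = u1 := by
        simp [PySem.List.pyGet?, PySem.List.pyIdx?]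
      have hBside : (PySem.List.min? (List.filter (fun s => decide (lo < s)) origScores) (fun x => x)).getD 0 = u1 := by
        rw [hsec]; exact hsecEq
      rw [if_neg hlen, if_neg hhi_ne, hidx, hBside]
      -- the two final sorted name lists agree up to permutation of their inputs
      exact PySem.List.sorted_eq_sorted_of_perm _ _ (fun x => x) (fun a b h => h)
        (((hperm.filter (fun r => r.2 == u1)).map (fun r => r.1)))

-- ===== VERDICT (by name: the statement is the Claim_ definition above) =====
theorem find_second_lowest_students_spec : Claim_equal_find_second_lowest_students := by
  intro records _
  unfold Spec_find_second_lowest_students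
  exact pv_main records
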